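-- pv_equiv track=rewrite | github.com/gmenessy/docstore-prod | app/ingestion/chunker.py | _get_overlap_sents
-- ===== SOURCE A (Python) =====
-- def estimate_tokens(text: str) -> int:
--     """Grobe Token-Schätzung (deutsch: ~1.3 Tokens pro Wort)."""
--     return int(len(text.split()) * 1.3)
--
-- def _get_overlap_sents(sentences: list[str], max_overlap_tokens: int) -> list[str]:
--     """Letzte Sätze für Überlappung auswählen."""
--     overlap = []
--     tokens = 0
--     for sent in reversed(sentences):
--         t = estimate_tokens(sent)
--         if tokens + t > max_overlap_tokens:
--             break
--         overlap.insert(0, sent)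
--         tokens += t
--     return overlap
-- ===== SOURCE B (Python) =====
-- def estimate_tokens(text: str) -> int:
--     """Grobe Token-Schätzung (deutsch: ~1.3 Tokens pro Wort)."""
--     return int(len(text.split()) * 1.3)
--
-- def _get_overlap_sents(sentences: list[str], max_overlap_tokens: int) -> list[str]:
--     """Letzte Sätze für Überlappung auswählen.
--
--     Builds a table of cumulative suffix token sums (suffix[k] = tokens of the
--     last k sentences), binary-searches the monotone table for the largest k
--     that fits the budget, and returns that suffix by slicing."""
--     suffix = [0]
--     for sent in reversed(sentences):
--         suffix.append(suffix[-1] + estimate_tokens(sent))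
--     lo, hi = 0, len(sentences)
--     while lo < hi:
--         mid = (lo + hi + 1) // 2
--         if suffix[mid] <= max_overlap_tokens:
--             lo = mid
--         else:
--             hi = mid - 1
--     return sentences[len(sentences) - lo:]
-- ===== Notes on version B (the rewrite author's own statement) =====
-- stated objective: faster
-- what changed: Replaced the reverse accumulate-and-insert(0) loop (quadratic due to insert at index 0) by a precomputed cumulative suffix-sum table, a binary search over that monotone table for the largest suffix within the token budget, and a single slice.
import Mathlib
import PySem

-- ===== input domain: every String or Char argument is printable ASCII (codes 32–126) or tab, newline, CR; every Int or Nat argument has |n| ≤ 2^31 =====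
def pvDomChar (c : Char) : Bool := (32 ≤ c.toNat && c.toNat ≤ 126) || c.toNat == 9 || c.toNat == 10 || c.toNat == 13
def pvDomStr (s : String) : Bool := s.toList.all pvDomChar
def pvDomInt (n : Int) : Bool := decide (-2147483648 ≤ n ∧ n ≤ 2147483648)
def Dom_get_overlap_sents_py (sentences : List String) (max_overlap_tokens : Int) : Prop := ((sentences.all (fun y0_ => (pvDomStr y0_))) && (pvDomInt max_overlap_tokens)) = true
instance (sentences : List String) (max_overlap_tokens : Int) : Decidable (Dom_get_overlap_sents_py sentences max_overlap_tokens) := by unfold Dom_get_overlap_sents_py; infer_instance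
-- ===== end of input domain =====

-- B replaces A's reverse accumulate-and-insert(0) loop by a suffix-sum table, a binary
-- search over that monotone table, and one slice (objective: alternative decomposition).

-- ===== PORT A =====
-- int(x * 1.3) with x = word count: exact emulation of IEEE-754 double rounding.
-- 1.3 as a double is exactly 5854679515581645 / 2^52; the product n * 1.3 is the
-- integer n * 5854679515581645 rounded to 53 significant bits (round half to even),
-- then divided by 2^52; int() on the nonnegative result truncates = floor.
def roundSig53 (p : Nat) : Nat :=
  if p < 9007199254740992 then p
  else
    let sh := (Nat.log2 p + 1) - 53
    let q := p / 2 ^ sh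
    let r := p % 2 ^ sh
    let half := 2 ^ (sh - 1)
    if half < r ∨ (r = half ∧ q % 2 = 1) then (q + 1) * 2 ^ sh else q * 2 ^ sh

def estimate_tokens_py (text : String) : Int :=
  ((roundSig53 ((PySem.Str.split₀ text).length * 5854679515581645) / 4503599627370496 : Nat) : Int)

def goA (m : Int) : List String → List String → Int → List String
  | [], overlap, _ => overlap
  | sent :: rest, overlap, tokens =>
    let t := estimate_tokens_py sent
    if tokens + t > m then overlap
    else goA m rest (sent :: overlap) (tokens + t)

def get_overlap_sents_py (sentences : List String) (max_overlap_tokens : Int) : List String :=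
  goA max_overlap_tokens sentences.reverse [] 0

-- ===== PORT B =====
-- suffix.append(suffix[-1] + estimate_tokens(sent)); state = (list so far, its last element)
def suffixStep (acc : List Int × Int) (sent : String) : List Int × Int :=
  (acc.1 ++ [acc.2 + estimate_tokens_py sent], acc.2 + estimate_tokens_py sent)

-- the while-loop binary search of Source B
def bsearch (suffix : List Int) (m : Int) (lo hi : Nat) : Nat :=
  if lo < hi then
    if suffix.getD ((lo + hi + 1) / 2) 0 ≤ m then bsearch suffix m ((lo + hi + 1) / 2) hi
    else bsearch suffix m lo ((lo + hi + 1) / 2 - 1)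
  else lo
termination_by hi - lo
decreasing_by all_goals omega

def get_overlap_sents_py_alt (sentences : List String) (max_overlap_tokens : Int) : List String :=
  let suffix := (sentences.reverse.foldl suffixStep ([0], 0)).1
  let lo := bsearch suffix max_overlap_tokens 0 sentences.length
  sentences.drop (sentences.length - lo)

-- ===== PRECONDITION & SPEC =====
def Spec_get_overlap_sents_py (sentences : List String) (max_overlap_tokens : Int) (out : List String) : Prop := out = get_overlap_sents_py_alt sentences max_overlap_tokens
instance (sentences : List String) (max_overlap_tokens : Int) (out : List String) : Decidable (Spec_get_overlap_sents_py sentences max_overlap_tokens out) := by unfold Spec_get_overlap_sents_py; infer_instance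

-- ===== CLAIM (what is proved, stated in full; the proofs are below) =====
def Claim_equal_get_overlap_sents_py : Prop := ∀ (sentences : List String) (max_overlap_tokens : Int), Dom_get_overlap_sents_py sentences max_overlap_tokens → Spec_get_overlap_sents_py sentences max_overlap_tokens (get_overlap_sents_py sentences max_overlap_tokens)

-- ===== LEMMAS AND PROOFS =====

theorem est_nonneg (s : String) : 0 ≤ estimate_tokens_py s := Int.natCast_nonneg _

-- reference form of A's loop body (selected reversed prefix, in order of selection)
def pick (m : Int) : List String → Int → List String
  | [], _ => []
  | sent :: rest, t =>
    if t + estimate_tokens_py sent > m then []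
    else sent :: pick m rest (t + estimate_tokens_py sent)

-- token total of the first k elements
def toksum (l : List String) (k : Nat) : Int := ((l.take k).map estimate_tokens_py).sum

theorem toksum_zero (l : List String) : toksum l 0 = 0 := rfl

theorem toksum_cons (s : String) (l : List String) (k : Nat) :
    toksum (s :: l) (k + 1) = estimate_tokens_py s + toksum l k := by
  simp [toksum]

theorem toksum_step (l : List String) (k : Nat) : toksum l k ≤ toksum l (k + 1) := by
  unfold toksum
  rw [List.take_succ]
  rcases h : l[k]? with _ | s <;> simp [h]
  exact est_nonneg s

theorem toksum_mono (l : List String) {i j : Nat} (h : i ≤ j) : toksum l i ≤ toksum l j := by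
  induction j with
  | zero => simp_all
  | succ j ih =>
    rcases Nat.lt_or_ge i (j + 1) with h' | h'
    · exact le_trans (ih (by omega)) (toksum_step l j)
    · have : i = j + 1 := by omega
      simp [this]

theorem goA_eq (m : Int) : ∀ (l ov : List String) (t : Int),
    goA m l ov t = (pick m l t).reverse ++ ov := by
  intro l
  induction l with
  | nil => intro ov t; simp [goA, pick]
  | cons s rest ih =>
    intro ov t
    simp only [goA, pick]
    split
    · simp
    · rw [ih]; simp

theorem pick_take (m : Int) : ∀ (l : List String) (t : Int),
    pick m l t = l.take (pick m l t).length := by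
  intro l
  induction l with
  | nil => intro t; rfl
  | cons s rest ih =>
    intro t
    simp only [pick]
    split
    · rfl
    · simp only [List.length_cons, List.take_succ_cons]
      rw [← ih]

theorem pick_len_le (m : Int) (l : List String) (t : Int) :
    (pick m l t).length ≤ l.length := by
  conv_lhs => rw [pick_take m l t]
  simp

theorem pick_good (m : Int) : ∀ (l : List String) (t : Int) (j : Nat),
    1 ≤ j → j ≤ (pick m l t).length → t + toksum l j ≤ m := by
  intro l
  induction l with
  | nil => intro t j h1 h2; simp [pick] at h2; omega
  | cons s rest ih =>
    intro t j h1 h2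
    simp only [pick] at h2
    split at h2
    · simp at h2; omega
    · rename_i hfit
      push_neg at hfit
      rcases j with _ | j
      · omega
      rcases j with _ | j
      · rw [toksum_cons, toksum_zero]; omega
      · rw [toksum_cons]
        have := ih (t + estimate_tokens_py s) (j + 1) (by omega)
          (by simpa using h2)
        omega

theorem pick_stop (m : Int) : ∀ (l : List String) (t : Int),
    (pick m l t).length = l.length ∨ m < t + toksum l ((pick m l t).length + 1) := by
  intro l
  induction l with
  | nil => intro t; left; rfl
  | cons s rest ih =>
    intro t
    simp only [pick]
    split
    · rename_i hbreak
      right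
      simpa [toksum_cons, toksum_zero] using hbreak
    · rcases ih (t + estimate_tokens_py s) with h | h
      · left; simp [h]
      · right
        simp only [List.length_cons]
        rw [toksum_cons]
        omega

-- partial sums of the tokens of l, starting from running total t (suffix[1..])
def sumsFrom (t : Int) : List String → List Int
  | [] => []
  | s :: rest => (t + estimate_tokens_py s) :: sumsFrom (t + estimate_tokens_py s) rest

theorem fold_eq : ∀ (l : List String) (acc : List Int) (t : Int),
    l.foldl suffixStep (acc ++ [t], t) = (acc ++ [t] ++ sumsFrom t l, t + ((l.map estimate_tokens_py).sum)) := by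
  intro l
  induction l with
  | nil => intro acc t; simp [sumsFrom]
  | cons s rest ih =>
    intro acc t
    have step : suffixStep (acc ++ [t], t) s = ((acc ++ [t]) ++ [t + estimate_tokens_py s], t + estimate_tokens_py s) := by
      simp [suffixStep]
    rw [List.foldl_cons, step, ih]
    simp [sumsFrom]
    ring

theorem sumsFrom_getD : ∀ (l : List String) (t : Int) (k : Nat), k < l.length →
    (sumsFrom t l).getD k 0 = t + toksum l (k + 1) := by
  intro l
  induction l with
  | nil => intro t k h; simp at h
  | cons s rest ih =>
    intro t k h
    rcases k with _ | k
    · simp [sumsFrom, toksum_cons, toksum_zero]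
    · simp only [sumsFrom, List.getD_cons_succ]
      rw [ih (t + estimate_tokens_py s) k (by simpa using h), toksum_cons]
      ring

theorem suffix_getD (l : List String) (k : Nat) (h : k ≤ l.length) :
    (((0 : Int) :: sumsFrom 0 l).getD k 0) = toksum l k := by
  rcases k with _ | k
  · simp [toksum_zero]
  · simp only [List.getD_cons_succ]
    rw [sumsFrom_getD l 0 k (by omega)]
    ring

theorem bsearch_spec (suffix : List Int) (m : Int) (N : Nat)
    (mono : ∀ i j, i ≤ j → j ≤ N → suffix.getD i 0 ≤ suffix.getD j 0) :
    ∀ (fuel lo hi : Nat), hi - lo ≤ fuel → lo ≤ hi → hi ≤ N →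
    (suffix.getD lo 0 ≤ m ∨ lo = 0) →
    (∀ k, hi < k → k ≤ N → ¬ suffix.getD k 0 ≤ m) →
    bsearch suffix m lo hi ≤ hi ∧
    (suffix.getD (bsearch suffix m lo hi) 0 ≤ m ∨ bsearch suffix m lo hi = 0) ∧
    (∀ k, bsearch suffix m lo hi < k → k ≤ N → ¬ suffix.getD k 0 ≤ m) := by
  intro fuel
  induction fuel with
  | zero =>
    intro lo hi hfuel hle hN hgood hmax
    have : lo = hi := by omega
    rw [bsearch]
    simp only [this, lt_irrefl, if_false]
    exact ⟨le_refl _, by rwa [this] at hgood, by simpa [this] using hmax⟩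
  | succ fuel ih =>
    intro lo hi hfuel hle hN hgood hmax
    rw [bsearch]
    by_cases hlt : lo < hi
    · simp only [hlt, if_true]
      have hmid : lo < (lo + hi + 1) / 2 ∧ (lo + hi + 1) / 2 ≤ hi := by omega
      by_cases hc : suffix.getD ((lo + hi + 1) / 2) 0 ≤ m
      · simp only [hc, if_true]
        exact ih ((lo + hi + 1) / 2) hi (by omega) (by omega) hN (Or.inl hc) hmax
      · simp only [hc, if_false]
        refine (ih lo ((lo + hi + 1) / 2 - 1) (by omega) (by omega) (by omega) hgood ?_).imp (by omega) id
        intro k hk hkN hgd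
        exact hc (le_trans (mono _ k (by omega) hkN) hgd)
    · simp only [hlt, if_false]
      have : lo = hi := by omega
      exact ⟨le_of_eq this, hgood, by simpa [this] using hmax⟩

-- ===== VERDICT (by name: the statement is the Claim_ definition above) =====
theorem get_overlap_sents_py_spec : Claim_equal_get_overlap_sents_py := by
  intro sentences m _
  unfold Spec_get_overlap_sents_py
  set r := sentences.reverse with hr
  have hrn : r.length = sentences.length := by simp [hr]
  -- A's value
  have hA : get_overlap_sents_py sentences m = (r.take (pick m r 0).length).reverse := by
    rw [get_overlap_sents_py, goA_eq]
    rw [pick_take m r 0]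
    simp
  -- B's suffix table
  have hsuf : (r.foldl suffixStep ([0], 0)).1 = (0 : Int) :: sumsFrom 0 r := by
    have := congrArg Prod.fst (fold_eq r [] 0)
    simpa using this
  set kA := (pick m r 0).length with hkA
  have hkAle : kA ≤ r.length := pick_len_le m r 0
  -- binary search spec
  have hmono : ∀ i j, i ≤ j → j ≤ r.length →
      (((0 : Int) :: sumsFrom 0 r).getD i 0) ≤ (((0 : Int) :: sumsFrom 0 r).getD j 0) := by
    intro i j hij hjN
    rw [suffix_getD r i (by omega), suffix_getD r j hjN]
    exact toksum_mono r hij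
  have hbs := bsearch_spec ((0 : Int) :: sumsFrom 0 r) m r.length hmono r.length 0 sentences.length
    (by omega) (by omega) (by omega) (Or.inr rfl) (by intro k h1 h2 _; omega)
  set lo := bsearch ((0 : Int) :: sumsFrom 0 r) m 0 sentences.length with hlo
  obtain ⟨hlohi, hlogood, hlomax⟩ := hbs
  -- (lo already bounded by sentences.length)
  -- lo = kA
  have hEq : lo = kA := by
    rcases Nat.lt_trichotomy lo kA with h | h | h
    · exfalso
      have hgoodkA : toksum r kA ≤ m := by
        have := pick_good m r 0 kA (by omega) (le_of_eq hkA.symm)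
        simpa using this
      exact hlomax kA h hkAle (by rwa [suffix_getD r kA hkAle])
    · exact h
    · exfalso
      have hlon0 : lo ≠ 0 := by omega
      have hgoodlo : toksum r lo ≤ m := by
        rcases hlogood with hg | hg
        · rwa [suffix_getD r lo (by omega)] at hg
        · exact absurd hg hlon0
      rcases pick_stop m r 0 with hs | hs
      · omega
      · rw [← hkA] at hs
        have : toksum r (kA + 1) ≤ toksum r lo := toksum_mono r (by omega)
        simp at hs
        omega
  -- B's value
  have hB : get_overlap_sents_py_alt sentences m = sentences.drop (sentences.length - lo) := by
    simp only [get_overlap_sents_py_alt, ← hr, hsuf, ← hlo]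
  rw [hA, hB, List.reverse_take, ← hEq]
  simp [hr]
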